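-- pv_equiv track=rewrite | github.com/ryzeon-dev/lonet | src/core.py | decodeRouteFlags
-- ===== SOURCE A (Python) =====
-- def _checkBit(flags, bit):
--     return (flags & bit) == bit
--
-- def decodeRouteFlags(flags):
--     intFlags = int(flags, 16)
--     strFlags = []
--
--     flagsDefinitions = {
--         0x0001 : 'usable',
--         0x0002 : 'gateway',
--         0x0004 : 'host entry',
--         0x0008 : 'reinstate',
--         0x0010 : 'dynamic',
--         0x0020 : 'modified',
--         0x0040 : 'specific mtu',
--         0x0080 : 'window clamping',
--         0x0100 : 'irtt',
--         0x0200 : 'reject'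
--     }
--
--     for bit, definition in flagsDefinitions.items():
--         if _checkBit(intFlags, bit):
--             strFlags.append(definition)
--
--     return strFlags
-- ===== SOURCE B (Python) =====
-- def decodeRouteFlags(flags):
--     names = ['usable', 'gateway', 'host entry', 'reinstate', 'dynamic',
--              'modified', 'specific mtu', 'window clamping', 'irtt', 'reject']
--     m = int(flags, 16) & 0x3FF
--     out = []
--     while m:
--         low = m & -m
--         out.append(names[low.bit_length() - 1])
--         m ^= low
--     return out
-- ===== Notes on version B (the rewrite author's own statement) =====
-- stated objective: alternative
-- what changed: Instead of iterating the bit->name dict and testing every defined bit, B masks the parsed value to the ten defined bits and walks only the bits that are actually set (lowest set bit via m & -m, indexing a name list by bit position, clearing with xor).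
import Mathlib
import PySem

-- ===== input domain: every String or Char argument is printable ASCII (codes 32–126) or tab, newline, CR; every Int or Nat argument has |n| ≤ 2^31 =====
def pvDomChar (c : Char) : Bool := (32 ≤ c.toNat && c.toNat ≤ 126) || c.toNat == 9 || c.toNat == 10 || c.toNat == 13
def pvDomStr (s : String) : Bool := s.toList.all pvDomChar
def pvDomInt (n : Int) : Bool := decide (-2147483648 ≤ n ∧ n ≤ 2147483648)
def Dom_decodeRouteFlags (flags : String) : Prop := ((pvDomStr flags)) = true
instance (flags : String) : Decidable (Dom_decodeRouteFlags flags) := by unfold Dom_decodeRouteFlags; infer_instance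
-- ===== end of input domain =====

-- B re-implements the decoder by masking the parsed value to the ten defined bits and walking only
-- the set bits (lowest first) instead of testing every defined bit; return values proved equal.

-- ===== PORT A =====
def pvCheckBit (flags bit : Int) : Bool := PySem.Int.band flags bit == bit

def pvFlagsDefinitions : PySem.Dict Int String :=
  PySem.Dict.ofList [(0x0001, "usable"), (0x0002, "gateway"), (0x0004, "host entry"),
    (0x0008, "reinstate"), (0x0010, "dynamic"), (0x0020, "modified"), (0x0040, "specific mtu"),
    (0x0080, "window clamping"), (0x0100, "irtt"), (0x0200, "reject")]

def pvACore (intFlags : Int) : List String :=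
  pvFlagsDefinitions.items.foldl
    (fun strFlags bd => if pvCheckBit intFlags bd.1 then strFlags ++ [bd.2] else strFlags) []

def decodeRouteFlags (flags : String) : List String :=
  match PySem.Int.ofStrBase? flags 16 with
  | none => []            -- int(flags, 16) raises ValueError: excluded by Pre_
  | some intFlags => pvACore intFlags

-- ===== PORT B =====
def pvNames : List String :=
  ["usable", "gateway", "host entry", "reinstate", "dynamic", "modified",
   "specific mtu", "window clamping", "irtt", "reject"]

-- Source B's while loop; its m satisfies m < 1024, so at most 10 iterations: fuel 11 never runs out.
def pvBLoop : Nat → Nat → List String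
  | 0, _ => []
  | fuel + 1, m =>
    if m = 0 then []
    else
      let low : Nat := (PySem.Int.band (m : Int) (-(m : Int))).toNat
      let name := (PySem.List.pyGet? pvNames ((PySem.Int.bitLength (low : Int) : Int) - 1)).getD ""
      name :: pvBLoop fuel (PySem.Int.bxor (m : Int) (low : Int)).toNat

def pvBCore (m : Nat) : List String := pvBLoop 11 m

def decodeRouteFlags_alt (flags : String) : List String :=
  match PySem.Int.ofStrBase? flags 16 with
  | none => []            -- int(flags, 16) raises ValueError: excluded by Pre_
  | some n => pvBCore (PySem.Int.band n 1023).toNat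

-- ===== PRECONDITION & SPEC =====
-- Pre_ excludes exactly the strings on which int(flags, 16) raises ValueError in A.
def Pre_decodeRouteFlags (flags : String) : Prop :=
  (PySem.Int.ofStrBase? flags 16).isSome = true
instance (flags : String) : Decidable (Pre_decodeRouteFlags flags) := by
  unfold Pre_decodeRouteFlags; infer_instance

def pvWitness_decodeRouteFlags : String := "1f3"

def Spec_decodeRouteFlags (flags : String) (out : List String) : Prop := out = decodeRouteFlags_alt flags
instance (flags : String) (out : List String) : Decidable (Spec_decodeRouteFlags flags out) := by unfold Spec_decodeRouteFlags; infer_instance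

-- ===== CLAIM (what is proved, stated in full; the proofs are below) =====
def Claim_equal_decodeRouteFlags : Prop := ∀ (flags : String), Dom_decodeRouteFlags flags → Pre_decodeRouteFlags flags → Spec_decodeRouteFlags flags (decodeRouteFlags flags)

-- ===== LEMMAS AND PROOFS =====

-- 10 × 1024 finite check: the negative-operand branch of band commutes with masking by 1023
set_option maxRecDepth 100000 in
lemma pvNatSub (i t : Nat) (hi : i < 10) (ht : t < 1024) :
    2 ^ i - (2 ^ i &&& t) = (1023 - (1023 &&& t)) &&& 2 ^ i := by
  revert t ht; revert i hi; decide

-- reduce an &&& with a 10-bit left operand to t % 1024 on the right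
lemma pvAndMod (b t : Nat) (hb : b &&& 1023 = b) : b &&& t = b &&& (t % 1024) := by
  have h1 : (1023 : Nat) &&& t = t % 1024 := by
    have := Nat.and_two_pow_sub_one_eq_mod t 10
    simpa [Nat.and_comm] using this
  calc b &&& t = (b &&& 1023) &&& t := by rw [hb]
    _ = b &&& (1023 &&& t) := Nat.and_assoc ..
    _ = b &&& (t % 1024) := by rw [h1]

lemma pvMaskAnd (n : Int) (i : Nat) (hi : i < 10) :
    PySem.Int.band n (2 ^ i : Nat) = ((PySem.Int.band n 1023).toNat &&& 2 ^ i : Nat) := by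
  have hb : (2 ^ i) &&& 1023 = 2 ^ i := by interval_cases i <;> decide
  rcases le_or_gt 0 n with hn | hn
  · have h1 : PySem.Int.band n (2 ^ i : Nat) = ((n.toNat &&& 2 ^ i : Nat) : Int) :=
      PySem.Int.band_of_nonneg hn (by positivity)
    have h2 : PySem.Int.band n 1023 = ((n.toNat &&& 1023 : Nat) : Int) :=
      PySem.Int.band_of_nonneg hn (by norm_num)
    rw [h1, h2, Int.toNat_natCast]
    norm_num [Nat.and_assoc, Nat.and_comm 1023 (2 ^ i), hb]
  · have hneg : ¬ (0 : Int) ≤ n := by omega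
    have hb2 : (0 : Int) ≤ ((2 ^ i : Nat) : Int) := by positivity
    have h1023 : (1023 : Int).toNat = 1023 := by decide
    have h1 : PySem.Int.band n ((2 ^ i : Nat) : Int)
        = (((2 ^ i : Nat) - ((2 ^ i : Nat) &&& (-n - 1).toNat) : Nat) : Int) := by
      unfold PySem.Int.band
      rw [if_neg hneg, if_pos hb2, Int.toNat_natCast]
    have h2 : PySem.Int.band n 1023 = ((1023 - (1023 &&& (-n - 1).toNat) : Nat) : Int) := by
      unfold PySem.Int.band
      rw [if_neg hneg, if_pos (by norm_num : (0 : Int) ≤ 1023), h1023]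
    rw [h1, h2, Int.toNat_natCast]
    have := pvNatSub i ((-n - 1).toNat % 1024) hi (Nat.mod_lt _ (by norm_num))
    rw [pvAndMod _ _ hb, pvAndMod 1023 _ (by decide)]
    exact_mod_cast congrArg (Nat.cast : Nat → Int) this

-- A's per-bit test only sees the ten masked bits
lemma pvCB (n : Int) (i : Nat) (hi : i < 10) (b : Int) (hb : b = ((2 ^ i : Nat) : Int)) :
    pvCheckBit n b = pvCheckBit ((PySem.Int.band n 1023).toNat : Int) b := by
  subst hb
  unfold pvCheckBit
  rw [pvMaskAnd n i hi, PySem.Int.band_natCast]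

lemma pvMask_lt (n : Int) : (PySem.Int.band n 1023).toNat < 1024 := by
  unfold PySem.Int.band
  have h1023 : (1023 : Int).toNat = 1023 := by decide
  rcases le_or_gt 0 n with hn | hn
  · rw [if_pos hn, if_pos (by norm_num : (0 : Int) ≤ 1023), h1023, Int.toNat_natCast]
    have : n.toNat &&& 1023 ≤ 1023 := Nat.and_le_right
    omega
  · rw [if_neg (by omega : ¬ (0 : Int) ≤ n), if_pos (by norm_num : (0 : Int) ≤ 1023), h1023,
        Int.toNat_natCast]
    have : 1023 - (1023 &&& (-n - 1).toNat) ≤ 1023 := Nat.sub_le _ _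
    omega

lemma items_eq : pvFlagsDefinitions.items =
    [(1, "usable"), (2, "gateway"), (4, "host entry"), (8, "reinstate"), (16, "dynamic"),
     (32, "modified"), (64, "specific mtu"), (128, "window clamping"), (256, "irtt"),
     (512, "reject")] := by decide

lemma pvACore_mask (n : Int) : pvACore n = pvACore ((PySem.Int.band n 1023).toNat : Int) := by
  unfold pvACore
  rw [items_eq]
  simp only [List.foldl_cons, List.foldl_nil]
  rw [pvCB n 0 (by norm_num) 1 (by norm_num), pvCB n 1 (by norm_num) 2 (by norm_num),
      pvCB n 2 (by norm_num) 4 (by norm_num), pvCB n 3 (by norm_num) 8 (by norm_num),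
      pvCB n 4 (by norm_num) 16 (by norm_num), pvCB n 5 (by norm_num) 32 (by norm_num),
      pvCB n 6 (by norm_num) 64 (by norm_num), pvCB n 7 (by norm_num) 128 (by norm_num),
      pvCB n 8 (by norm_num) 256 (by norm_num), pvCB n 9 (by norm_num) 512 (by norm_num)]

set_option maxRecDepth 100000 in
lemma pvSmall (m : Nat) (hm : m < 1024) : pvACore (m : Int) = pvBCore m := by
  revert m hm; decide

-- ===== VERDICT (by name: the statement is the Claim_ definition above) =====
theorem decodeRouteFlags_spec : Claim_equal_decodeRouteFlags := by
  intro flags _ hpre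
  unfold Pre_decodeRouteFlags at hpre
  unfold Spec_decodeRouteFlags decodeRouteFlags decodeRouteFlags_alt
  cases h : PySem.Int.ofStrBase? flags 16 with
  | none => simp [h] at hpre
  | some n => exact (pvACore_mask n).trans (pvSmall _ (pvMask_lt n))
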